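-- pv_equiv track=rewrite | github.com/KrishnaNarkhede/PROTOTYPE-SIH | complete_enhanced_analyzer.py | _check_contamination
-- ===== SOURCE A (Python) =====
-- def _check_contamination(sequence: str) -> bool:
--     """Check for contamination patterns"""
--     contaminants = [
--         'GGGGGGGGGG',  # Homopolymer runs
--         'AAAAAAAAAA',
--         'TTTTTTTTTT',
--         'CCCCCCCCCC',
--         'ATATATATATAT',  # Simple repeats
--         'GCGCGCGCGCGC'
--     ]
--
--     return any(contaminant in sequence for contaminant in contaminants)
-- ===== SOURCE B (Python) =====
-- def _check_contamination(sequence: str) -> bool: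
--     """Check for contamination patterns (single scan over positions)."""
--     patterns = ('GGGGGGGGGG', 'AAAAAAAAAA', 'TTTTTTTTTT',
--                 'CCCCCCCCCC', 'ATATATATATAT', 'GCGCGCGCGCGC')
--     for i in range(len(sequence)):
--         if any(sequence.startswith(p, i) for p in patterns):
--             return True
--     return False
-- ===== Notes on version B (the rewrite author's own statement) =====
-- stated objective: alternative
-- what changed: Replaced six independent whole-string substring-membership scans (one per contaminant) with a single left-to-right pass over positions that checks at each position whether any of the six patterns starts there.
import Mathlib
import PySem

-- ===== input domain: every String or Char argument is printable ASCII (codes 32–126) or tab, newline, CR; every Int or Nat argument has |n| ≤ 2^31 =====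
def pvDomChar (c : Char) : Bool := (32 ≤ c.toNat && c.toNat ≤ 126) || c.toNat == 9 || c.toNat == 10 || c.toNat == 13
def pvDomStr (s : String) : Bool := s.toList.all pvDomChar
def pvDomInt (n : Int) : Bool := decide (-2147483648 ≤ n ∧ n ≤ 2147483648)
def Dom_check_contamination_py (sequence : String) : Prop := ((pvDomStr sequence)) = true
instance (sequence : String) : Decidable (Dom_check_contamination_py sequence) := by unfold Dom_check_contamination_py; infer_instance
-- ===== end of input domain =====

-- B replaces six independent substring scans by a single pass over positions checking each pattern there (alternative; return value equivalence).


-- ===== PORT A =====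
def check_contamination_py (sequence : String) : Bool :=
  ["GGGGGGGGGG", "AAAAAAAAAA", "TTTTTTTTTT",
   "CCCCCCCCCC", "ATATATATATAT", "GCGCGCGCGCGC"].any
    (fun contaminant => PySem.Str.isIn contaminant sequence)

-- ===== PORT B =====
def pvPatterns : List String :=
  ["GGGGGGGGGG", "AAAAAAAAAA", "TTTTTTTTTT",
   "CCCCCCCCCC", "ATATATATATAT", "GCGCGCGCGCGC"]

-- one pass: at each position (suffix) test whether some pattern starts there
def pvScan (pats : List String) : List Char → Bool
  | [] => false
  | c :: t =>
      pats.any (fun p => PySem.Chars.startswith (c :: t) p.toList) || pvScan pats t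

def check_contamination_py_alt (sequence : String) : Bool :=
  pvScan pvPatterns sequence.toList

-- ===== PRECONDITION & SPEC =====
def Spec_check_contamination_py (sequence : String) (out : Bool) : Prop := out = check_contamination_py_alt sequence
instance (sequence : String) (out : Bool) : Decidable (Spec_check_contamination_py sequence out) := by unfold Spec_check_contamination_py; infer_instance

-- ===== CLAIM (what is proved, stated in full; the proofs are below) =====
def Claim_equal_check_contamination_py : Prop := ∀ (sequence : String), Dom_check_contamination_py sequence → Spec_check_contamination_py sequence (check_contamination_py sequence)

-- ===== LEMMAS AND PROOFS =====

-- ===== VERDICT (by name: the statement is the Claim_ definition above) =====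
lemma pvScan_iff (pats : List String) (hne : ∀ p ∈ pats, p.toList ≠ [])
    (l : List Char) : pvScan pats l = true ↔ ∃ p ∈ pats, p.toList <:+: l := by
  induction l with
  | nil =>
      refine iff_of_false (by simp [pvScan]) ?_
      rintro ⟨p, hp, hinf⟩
      exact hne p hp (List.eq_nil_of_infix_nil hinf)
  | cons c t ih =>
      simp only [pvScan, Bool.or_eq_true, List.any_eq_true, PySem.Chars.startswith_iff, ih]
      constructor
      · rintro (⟨p, hp, hpre⟩ | ⟨p, hp, hinf⟩)
        · exact ⟨p, hp, hpre.isInfix⟩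
        · exact ⟨p, hp, hinf.trans (List.suffix_cons c t).isInfix⟩
      · rintro ⟨p, hp, hinf⟩
        rcases List.infix_cons_iff.mp hinf with hpre | hinf'
        · exact Or.inl ⟨p, hp, hpre⟩
        · exact Or.inr ⟨p, hp, hinf'⟩

theorem check_contamination_py_spec : Claim_equal_check_contamination_py := by
  intro sequence _
  unfold Spec_check_contamination_py check_contamination_py check_contamination_py_alt
  apply Bool.eq_iff_iff.mpr
  rw [pvScan_iff pvPatterns (by decide) sequence.toList]
  simp only [List.any_eq_true, PySem.Str.isIn_iff_infix]
  constructor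
  · rintro ⟨p, hp, h⟩; exact ⟨p, hp, h⟩
  · rintro ⟨p, hp, h⟩
    fin_cases hp <;> first
      | exact ⟨_, by simp, h⟩
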